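-- pv_equiv track=rewrite | github.com/DridhaTeamHQ/ai-agent-browser | core/media/image_quality.py | _collapse_reasons
-- ===== SOURCE A (Python) =====
-- from typing import Dict, List, Optional, Tuple
--
-- def _collapse_reasons(reasons: List[str]) -> str:
--     if not reasons:
--         return "download_failed"
--     priority = [
--         "overlay_or_branding_url_rejected",
--         "resolution_too_low",
--         "unknown_dimensions",
--         "blur_detected",
--         "low_relevance",
--         "file_too_small",
--         "download_failed",
--         "non_image_content",
--         "extreme_aspect_ratio",
--     ]
--     for reason in priority:
--         if reason in reasons:
--             return reason
--     return reasons[0]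
-- ===== SOURCE B (Python) =====
-- def _collapse_reasons(reasons):
--     if not reasons:
--         return "download_failed"
--     priority = [
--         "overlay_or_branding_url_rejected",
--         "resolution_too_low",
--         "unknown_dimensions",
--         "blur_detected",
--         "low_relevance",
--         "file_too_small",
--         "download_failed",
--         "non_image_content",
--         "extreme_aspect_ratio",
--     ]
--     rank = {r: i for i, r in enumerate(priority)}
--     return min(reasons, key=lambda r: rank.get(r, len(priority)))
-- ===== Notes on version B (the rewrite author's own statement) =====
-- stated objective: idiomatic
-- what changed: Replaces A's loop over the 9-entry priority list with inner membership scans of reasons by a precomputed rank table and a single stable argmin pass over reasons (min with key).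
import Mathlib
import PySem

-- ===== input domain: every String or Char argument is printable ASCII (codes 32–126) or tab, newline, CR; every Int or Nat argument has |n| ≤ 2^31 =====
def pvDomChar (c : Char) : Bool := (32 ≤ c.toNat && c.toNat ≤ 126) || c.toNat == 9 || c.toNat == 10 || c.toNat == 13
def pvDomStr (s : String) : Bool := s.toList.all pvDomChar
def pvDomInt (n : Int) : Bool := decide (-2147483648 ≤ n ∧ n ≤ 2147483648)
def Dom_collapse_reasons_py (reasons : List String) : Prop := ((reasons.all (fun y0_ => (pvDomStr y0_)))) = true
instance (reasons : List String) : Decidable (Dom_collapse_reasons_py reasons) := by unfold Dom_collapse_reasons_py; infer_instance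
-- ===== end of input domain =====

-- B replaces A's loop over the priority list (with inner membership scans) by one
-- stable argmin pass over `reasons` using a precomputed rank table (more idiomatic).

-- the fixed priority list, written verbatim in both Python sources
def pvPriority : List String :=
  [ "overlay_or_branding_url_rejected",
    "resolution_too_low",
    "unknown_dimensions",
    "blur_detected",
    "low_relevance",
    "file_too_small",
    "download_failed",
    "non_image_content",
    "extreme_aspect_ratio" ]

-- ===== PORT A =====
-- A's 'for reason in priority: if reason in reasons: return reason' loop
def pvCollapseLoop (priority : List String) (reasons : List String) : Option String :=
  match priority with
  | [] => none
  | p :: rest => if reasons.contains p then some p else pvCollapseLoop rest reasons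

def collapse_reasons_py (reasons : List String) : String :=
  match reasons with
  | [] => "download_failed"
  | r0 :: _ =>
    match pvCollapseLoop pvPriority reasons with
    | some p => p
    | none => r0          -- 'return reasons[0]'

-- ===== PORT B =====
def collapse_reasons_py_alt (reasons : List String) : String :=
  match reasons with
  | [] => "download_failed"
  | r0 :: _ =>
    let rank : PySem.Dict String Int :=
      (PySem.List.enumerate pvPriority).foldl (fun d p => d.insert p.2 p.1) PySem.Dict.empty
    match PySem.List.min? reasons (fun r => rank.getD r ((pvPriority.length : Int))) with
    | some m => m
    | none => r0          -- unreachable: Python's min is only called on a nonempty list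

-- ===== PRECONDITION & SPEC =====
def Spec_collapse_reasons_py (reasons : List String) (out : String) : Prop := out = collapse_reasons_py_alt reasons
instance (reasons : List String) (out : String) : Decidable (Spec_collapse_reasons_py reasons out) := by unfold Spec_collapse_reasons_py; infer_instance

-- ===== CLAIM (what is proved, stated in full; the proofs are below) =====
def Claim_equal_collapse_reasons_py : Prop := ∀ (reasons : List String), Dom_collapse_reasons_py reasons → Spec_collapse_reasons_py reasons (collapse_reasons_py reasons)

-- ===== LEMMAS AND PROOFS =====

-- B's rank table and key function, named for the proofs
def pvRank : PySem.Dict String Int :=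
  (PySem.List.enumerate pvPriority).foldl (fun d p => d.insert p.2 p.1) PySem.Dict.empty

def pvKey (r : String) : Int := pvRank.getD r ((pvPriority.length : Int))

lemma alt_cons (r0 : String) (t : List String) :
    collapse_reasons_py_alt (r0 :: t) =
      match PySem.List.min? (r0 :: t) pvKey with
      | some m => m
      | none => r0 := rfl

lemma pvKey_getElem : ∀ i (h : i < pvPriority.length), pvKey (pvPriority[i]) = (i : Int) := by
  decide

lemma pvRank_items : pvRank.items.map Prod.fst = pvPriority := by rfl

lemma mem_of_get?_some {r : String} {v : Int} (h : pvRank.get? r = some v) : r ∈ pvPriority := by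
  have hm : (r, v) ∈ pvRank.items := PySem.Dict.mem_items_of_get?_eq_some _ h
  have : r ∈ pvRank.items.map Prod.fst := List.mem_map_of_mem hm
  rwa [pvRank_items] at this

lemma pvKey_of_not_mem {r : String} (h : r ∉ pvPriority) : pvKey r = 9 := by
  cases hg : pvRank.get? r with
  | none =>
    rw [pvKey, PySem.Dict.getD_eq_get?_getD, hg]
    rfl
  | some v => exact absurd (mem_of_get?_some hg) h

lemma pvKey_lt_mem {r : String} (h : pvKey r < 9) : r ∈ pvPriority := by
  by_contra hn
  rw [pvKey_of_not_mem hn] at h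
  omega

-- characterisation of A's loop when it finds an element
lemma loop_some {priority reasons : List String} {p : String}
    (h : pvCollapseLoop priority reasons = some p) :
    ∃ i, ∃ (hi : i < priority.length), priority[i] = p ∧ p ∈ reasons ∧
      ∀ j (hj : j < i), priority[j]'(by omega) ∉ reasons := by
  induction priority with
  | nil => simp [pvCollapseLoop] at h
  | cons q rest ih =>
    by_cases hq : q ∈ reasons
    · simp only [pvCollapseLoop, List.contains_iff_mem, if_pos hq, Option.some.injEq] at h
      exact ⟨0, by simp, by simp [h], h ▸ hq, by omega⟩
    · simp only [pvCollapseLoop, List.contains_iff_mem, if_neg hq] at h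
      obtain ⟨i, hi, hp, hmem, hfirst⟩ := ih h
      refine ⟨i + 1, by simpa using Nat.succ_lt_succ hi, by simpa using hp, hmem, ?_⟩
      intro j hj
      cases j with
      | zero => simpa using hq
      | succ j' => simpa using hfirst j' (by omega)

lemma loop_none {priority reasons : List String}
    (h : pvCollapseLoop priority reasons = none) : ∀ q ∈ priority, q ∉ reasons := by
  induction priority with
  | nil => simp
  | cons q rest ih =>
    by_cases hq : q ∈ reasons
    · simp [pvCollapseLoop, hq] at h
    · simp only [pvCollapseLoop, List.contains_iff_mem, if_neg hq] at h
      intro x hx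
      rcases List.mem_cons.mp hx with rfl | hx'
      · exact hq
      · exact ih h x hx'

-- the foldl inside min? keeps the accumulator when no later key is strictly smaller
lemma foldl_min_stay {α : Type} (key : α → Int) (t : List α) (m : α)
    (h : ∀ x ∈ t, ¬ key x < key m) :
    t.foldl (fun acc x =>
      match acc with
      | none => some x
      | some m' => if key x < key m' then some x else some m') (some m) = some m := by
  induction t with
  | nil => rfl
  | cons x t' ih =>
    have hx : ¬ key x < key m := h x (by simp)
    simp only [List.foldl, hx]
    exact ih (fun y hy => h y (by simp [hy]))

lemma min?_cons_isSome {α : Type} (key : α → Int) (r0 : α) (t : List α) :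
    ∃ m, PySem.List.min? (r0 :: t) key = some m := by
  simp only [PySem.List.min?, List.foldl]
  induction t generalizing r0 with
  | nil => exact ⟨r0, rfl⟩
  | cons x t' ih =>
    simp only [List.foldl]
    split
    · exact ih x
    · exact ih r0

lemma min?_const {α : Type} (key : α → Int) (r0 : α) (t : List α)
    (h : ∀ x ∈ t, ¬ key x < key r0) :
    PySem.List.min? (r0 :: t) key = some r0 := by
  simp only [PySem.List.min?, List.foldl]
  exact foldl_min_stay key t r0 h

-- ===== VERDICT (by name: the statement is the Claim_ definition above) =====
theorem collapse_reasons_py_spec : Claim_equal_collapse_reasons_py := by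
  intro reasons _
  unfold Spec_collapse_reasons_py
  cases reasons with
  | nil => rfl
  | cons r0 t =>
    rw [alt_cons]
    cases h : pvCollapseLoop pvPriority (r0 :: t) with
    | none =>
      have hall := loop_none h
      have hmin : PySem.List.min? (r0 :: t) pvKey = some r0 := by
        apply min?_const
        intro x hx
        have hx9 : pvKey x = 9 := pvKey_of_not_mem (fun hm => hall x hm (by simp [hx]))
        have hr9 : pvKey r0 = 9 := pvKey_of_not_mem (fun hm => hall r0 hm (by simp))
        omega
      simp [collapse_reasons_py, h, hmin]
    | some p =>
      obtain ⟨i, hi, hp, hmem, hfirst⟩ := loop_some h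
      cases hm : PySem.List.min? (r0 :: t) pvKey with
      | none =>
        obtain ⟨m', hm'⟩ := min?_cons_isSome pvKey r0 t
        rw [hm] at hm'; exact absurd hm' (by simp)
      | some m =>
        have hmmem : m ∈ r0 :: t := PySem.List.min?_mem hm
        have hmin : ∀ y ∈ r0 :: t, pvKey m ≤ pvKey y := PySem.List.min?_isMin hm
        have hkp : pvKey p = (i : Int) := hp ▸ pvKey_getElem i hi
        have hi9 : i < 9 := hi
        have hle : pvKey m ≤ (i : Int) := hkp ▸ hmin p hmem
        have hmpr : m ∈ pvPriority := pvKey_lt_mem (by omega)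
        obtain ⟨j, hj, hjm⟩ := List.mem_iff_getElem.mp hmpr
        have hkm : pvKey m = (j : Int) := hjm ▸ pvKey_getElem j hj
        have hji : j ≤ i := by
          have : (j : Int) ≤ (i : Int) := hkm ▸ hle
          exact_mod_cast this
        have hij : j = i := by
          rcases Nat.lt_or_ge j i with hlt | hge
          · exact absurd hmmem (hjm ▸ hfirst j hlt)
          · omega
        have hmp : m = p := by subst hij; exact hjm.symm.trans hp
        simp [collapse_reasons_py, h, hmp]
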